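-- pv_equiv track=rewrite | github.com/posl/comment_recommendation | script/mod_gen/4_time/en/136_B/7.py | count_odd_digits
-- ===== SOURCE A (Python) =====
-- def count_odd_digits(n):
--     # 1桁の場合
--     if n < 10:
--         return 1
--     # 2桁以上の場合
--     count = 9
--     for i in range(10, n + 1):
--         if len(str(i)) % 2 == 1:
--             count += 1
--     return count
-- ===== SOURCE B (Python) =====
-- def count_odd_digits(n):
--     if n < 10:
--         return 1
--     total = 9
--     d = len(str(n))
--     for k in range(3, d + 1, 2):
--         total += min(n, 10 ** k - 1) - 10 ** (k - 1) + 1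
--     return total
-- ===== Notes on version B (the rewrite author's own statement) =====
-- stated objective: faster
-- what changed: Replaces the per-number loop over the whole range (testing the digit-length of every single integer) by a closed-form summation of one block per odd digit-length, so the work is logarithmic in n instead of linear.
import Mathlib
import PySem

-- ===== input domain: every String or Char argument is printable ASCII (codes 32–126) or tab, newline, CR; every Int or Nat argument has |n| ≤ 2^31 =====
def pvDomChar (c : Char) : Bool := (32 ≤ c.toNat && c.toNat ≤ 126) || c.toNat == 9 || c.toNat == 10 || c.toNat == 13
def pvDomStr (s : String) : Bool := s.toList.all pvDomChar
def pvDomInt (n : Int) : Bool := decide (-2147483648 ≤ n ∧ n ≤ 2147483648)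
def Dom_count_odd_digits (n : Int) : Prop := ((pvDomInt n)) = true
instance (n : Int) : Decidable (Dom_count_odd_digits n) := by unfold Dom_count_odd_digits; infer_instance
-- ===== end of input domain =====

-- B replaces A's per-number scan of the whole range by a closed-form block sum, one term per odd digit-length (objective: faster).

-- ===== PORT A =====
def count_odd_digits (n : Int) : Int :=
  if n < 10 then 1
  else
    (PySem.List.pyRange 10 (n + 1) 1).foldl
      (fun count i => if (PySem.Int.toChars i).length % 2 == 1 then count + 1 else count) 9

-- ===== PORT B =====
def count_odd_digits_alt (n : Int) : Int :=
  if n < 10 then 1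
  else
    (PySem.List.pyRange 3 (((PySem.Int.toChars n).length : Int) + 1) 2).foldl
      (fun total k => total + (min n ((10 : Int) ^ k.toNat - 1) - (10 : Int) ^ (k - 1).toNat + 1)) 9

-- ===== PRECONDITION & SPEC =====
def Spec_count_odd_digits (n : Int) (out : Int) : Prop := out = count_odd_digits_alt n
instance (n : Int) (out : Int) : Decidable (Spec_count_odd_digits n out) := by unfold Spec_count_odd_digits; infer_instance

-- ===== CLAIM (what is proved, stated in full; the proofs are below) =====
def Claim_equal_count_odd_digits : Prop := ∀ (n : Int), Dom_count_odd_digits n → Spec_count_odd_digits n (count_odd_digits n)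

-- ===== LEMMAS AND PROOFS =====

lemma pvTdcFuel : ∀ (f1 f2 n : Nat) (l : List Char), n < f1 → n < f2 →
    Nat.toDigitsCore 10 f1 n l = Nat.toDigitsCore 10 f2 n l := by
  intro f1
  induction f1 with
  | zero => intro f2 n l h1; omega
  | succ f ih =>
    intro f2 n l h1 h2
    cases f2 with
    | zero => omega
    | succ f2 =>
      simp only [Nat.toDigitsCore]
      by_cases hx : n / 10 = 0
      · simp [hx]
      · simp only [hx, if_false]
        exact ih f2 (n / 10) _ (by omega) (by omega)

lemma pvLenSmall (n : Nat) (h : n < 10) : (Nat.toDigits 10 n).length = 1 := by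
  simp [Nat.toDigits, Nat.toDigitsCore, Nat.div_eq_of_lt h]

lemma pvLenStep (n : Nat) (h : 10 ≤ n) :
    (Nat.toDigits 10 n).length = (Nat.toDigits 10 (n / 10)).length + 1 := by
  have hx : ¬ (n / 10 = 0) := by
    have := Nat.div_le_div_right (c := 10) h; omega
  unfold Nat.toDigits
  conv_lhs => rw [show n + 1 = Nat.succ n from rfl]
  simp only [Nat.toDigitsCore, hx, if_false]
  rw [Nat.toDigitsCore_lens_eq]
  congr 2
  exact pvTdcFuel n (n / 10 + 1) (n / 10) _ (by omega) (by omega)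

lemma pvLenEq : ∀ (e n : Nat), 1 ≤ e → 10 ^ (e - 1) ≤ n → n < 10 ^ e →
    (Nat.toDigits 10 n).length = e := by
  intro e
  induction e with
  | zero => omega
  | succ e ih =>
    intro n _ h1 h2
    cases Nat.eq_zero_or_pos e with
    | inl h0 =>
      subst h0
      exact pvLenSmall n (by simpa using h2)
    | inr he =>
      have h10 : 10 ≤ n := by
        calc 10 = 10 ^ 1 := by norm_num
        _ ≤ 10 ^ e := Nat.pow_le_pow_right (by norm_num) he
        _ ≤ n := by simpa using h1
      rw [pvLenStep n h10, ih (n / 10) he]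
      · have : 10 ^ (e - 1) * 10 ≤ n := by
          have : 10 ^ (e - 1) * 10 = 10 ^ e := by
            rw [← pow_succ]; congr 1; omega
          simpa [this] using h1
        omega
      · refine Nat.div_lt_of_lt_mul ?_
        calc n < 10 ^ (e + 1) := h2
        _ = 10 * 10 ^ e := by rw [pow_succ, mul_comm]

lemma pvBracket : ∀ (n : Nat), 1 ≤ n →
    1 ≤ (Nat.toDigits 10 n).length ∧
    10 ^ ((Nat.toDigits 10 n).length - 1) ≤ n ∧ n < 10 ^ (Nat.toDigits 10 n).length := by
  intro n
  induction n using Nat.strong_induction_on with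
  | _ n ih =>
    intro h1
    by_cases h : n < 10
    · rw [pvLenSmall n h]; simpa using ⟨h1, h⟩
    · rw [not_lt] at h
      have hrec := pvLenStep n h
      have hq1 : 1 ≤ n / 10 := Nat.one_le_div_iff (by norm_num) |>.mpr h
      obtain ⟨hL, hlo, hhi⟩ := ih (n / 10) (Nat.div_lt_self (by omega) (by norm_num)) hq1
      set L := (Nat.toDigits 10 (n / 10)).length with hLdef
      rw [hrec]
      refine ⟨by omega, ?_, ?_⟩
      · have : 10 ^ L = 10 ^ (L - 1) * 10 := by rw [← pow_succ]; congr 1; omega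
        have h2 : 10 ^ (L - 1) * 10 ≤ (n / 10) * 10 := Nat.mul_le_mul_right _ hlo
        have h3 : (n / 10) * 10 ≤ n := by
          have := Nat.div_mul_le_self n 10; omega
        simpa [Nat.add_sub_cancel, this] using le_trans h2 h3
      · have h2 : n < (n / 10 + 1) * 10 := by
          have h4 := Nat.mod_lt n (show 0 < 10 by norm_num)
          have h5 := Nat.div_add_mod n 10; omega
        have h3 : (n / 10 + 1) * 10 ≤ 10 ^ L * 10 := Nat.mul_le_mul_right _ (by omega)
        calc n < (n / 10 + 1) * 10 := h2
        _ ≤ 10 ^ L * 10 := h3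
        _ = 10 ^ (L + 1) := by rw [pow_succ]

def pvD (n : Int) : Nat := (PySem.Int.toChars n).length

lemma pvD_eq (n : Int) (h : 0 ≤ n) : pvD n = (Nat.toDigits 10 n.toNat).length := by
  simp [pvD, PySem.Int.toChars, not_lt.mpr h]

lemma pvD_bracket (n : Int) (h : 1 ≤ n) :
    1 ≤ pvD n ∧ (10 : Int) ^ (pvD n - 1) ≤ n ∧ n < (10 : Int) ^ (pvD n) := by
  rw [pvD_eq n (by omega)]
  obtain ⟨h1, h2, h3⟩ := pvBracket n.toNat (by omega)
  refine ⟨h1, ?_, ?_⟩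
  · have := (Int.toNat_of_nonneg (show 0 ≤ n by omega))
    calc ((10:Int) ^ ((Nat.toDigits 10 n.toNat).length - 1)) = ((10 ^ ((Nat.toDigits 10 n.toNat).length - 1) : Nat) : Int) := by push_cast; ring
    _ ≤ (n.toNat : Int) := by exact_mod_cast h2
    _ = n := this
  · have := (Int.toNat_of_nonneg (show 0 ≤ n by omega))
    calc n = (n.toNat : Int) := this.symm
    _ < ((10 ^ (Nat.toDigits 10 n.toNat).length : Nat) : Int) := by exact_mod_cast h3
    _ = (10:Int) ^ (Nat.toDigits 10 n.toNat).length := by push_cast; ring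

lemma pvD_of_bracket (n : Int) (e : Nat) (he : 1 ≤ e)
    (h1 : (10 : Int) ^ (e - 1) ≤ n) (h2 : n < (10 : Int) ^ e) : pvD n = e := by
  have hn : 1 ≤ n := le_trans (one_le_pow₀ (by norm_num)) h1
  rw [pvD_eq n (by omega)]
  apply pvLenEq e n.toNat he
  · have : ((10 ^ (e-1) : Nat) : Int) ≤ (n.toNat : Int) := by
      rw [Int.toNat_of_nonneg (by omega)]; exact_mod_cast h1
    exact_mod_cast this
  · have : (n.toNat : Int) < ((10 ^ e : Nat) : Int) := by
      rw [Int.toNat_of_nonneg (by omega)]; exact_mod_cast h2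
    exact_mod_cast this

def pvG (n : Int) (k : Nat) : Int := min n ((10 : Int) ^ k - 1) - (10 : Int) ^ (k - 1) + 1

def pvBsum (n : Int) (c : Nat) : Int := ((List.range c).map (fun j => pvG n (3 + 2 * j))).sum

lemma pvCount (d : Nat) (hd : 2 ≤ d) :
    (if (3:Int) < (d:Int) + 1 then (((d:Int) + 1 - 3 + 2 - 1) / 2).toNat else 0) = (d - 1) / 2 := by
  by_cases h3 : (3:Int) < (d:Int) + 1
  · rw [if_pos h3]
    have h1 : (d:Int) + 1 - 3 + 2 - 1 = ((d - 1 : Nat) : Int) := by omega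
    rw [h1, show ((2:Int)) = ((2:Nat):Int) from rfl, ← Int.natCast_div, Int.toNat_natCast]
  · rw [if_neg h3]
    omega

lemma pvB_eq (n : Int) (h : 10 ≤ n) :
    count_odd_digits_alt n = 9 + pvBsum n ((pvD n - 1) / 2) := by
  have hd2 : 2 ≤ pvD n := by
    by_contra hc
    obtain ⟨h1, h2, h3⟩ := pvD_bracket n (by omega)
    interval_cases hD : pvD n <;> simp at h3 <;> omega
  rw [count_odd_digits_alt, if_neg (by omega)]
  rw [PySem.List.pyRange_of_pos 3 (((PySem.Int.toChars n).length : Int) + 1) (by norm_num)]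
  rw [PySem.List.foldl_add]
  show (9:Int) + _ = _
  congr 1
  rw [List.map_map]
  show (List.map _ (List.range (if (3:Int) < ((pvD n : Int)) + 1 then ((((pvD n : Int)) + 1 - 3 + 2 - 1) / 2).toNat else 0))).sum = _
  rw [pvCount (pvD n) hd2]
  unfold pvBsum
  congr 1
  apply List.map_congr_left
  intro j _
  show min n ((10:Int) ^ ((3:Int) + 2 * (j:Int)).toNat - 1) - (10:Int) ^ (((3:Int) + 2 * (j:Int)) - 1).toNat + 1 = pvG n (3 + 2 * j)
  have e1 : ((3:Int) + 2 * (j:Int)).toNat = 3 + 2 * j := by omega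
  have e2 : (((3:Int) + 2 * (j:Int)) - 1).toNat = (3 + 2 * j) - 1 := by omega
  rw [e1, e2, pvG]

lemma pvG_stable (n : Int) (k : Nat) (h : (10:Int) ^ k - 1 ≤ n) :
    pvG (n + 1) k = pvG n k := by
  unfold pvG
  rw [min_eq_right (by omega), min_eq_right (by omega)]

lemma pvBsum_stable (n : Int) (c : Nat) (h : ∀ j, j < c → (10:Int) ^ (3 + 2 * j) - 1 ≤ n) :
    pvBsum (n + 1) c = pvBsum n c := by
  unfold pvBsum
  congr 1
  apply List.map_congr_left
  intro j hj
  exact pvG_stable n (3 + 2 * j) (h j (List.mem_range.mp hj))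

lemma pvPowLe (a b : Nat) (h : a ≤ b) : (10:Int) ^ a ≤ (10:Int) ^ b :=
  pow_le_pow_right₀ (by norm_num) h

lemma pvB_step (n : Int) (h : 10 ≤ n) :
    count_odd_digits_alt (n + 1) =
      count_odd_digits_alt n + (if (pvD (n + 1)) % 2 == 1 then 1 else 0) := by
  obtain ⟨hd1, h2, h3⟩ := pvD_bracket n (by omega)
  set d := pvD n with hddef
  have hd2 : 2 ≤ d := by
    by_contra hc
    interval_cases hD : d <;> simp at h3 <;> omega
  rw [pvB_eq n h, pvB_eq (n + 1) (by omega)]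
  by_cases hii : n + 1 < 10 ^ d
  · have hd' : pvD (n + 1) = d :=
      pvD_of_bracket (n + 1) d (by omega) (by omega) hii
    rw [hd']
    by_cases hodd : d % 2 = 1
    · -- d odd: last term grows by 1
      have hc1 : (d - 1) / 2 = (d - 3) / 2 + 1 := by omega
      have hk : 3 + 2 * ((d - 3) / 2) = d := by omega
      rw [hc1]
      unfold pvBsum
      rw [List.range_succ, List.map_append, List.map_append, List.sum_append, List.sum_append]
      have hfront : (List.map (fun j => pvG (n+1) (3 + 2 * j)) (List.range ((d-3)/2))).sum
          = (List.map (fun j => pvG n (3 + 2 * j)) (List.range ((d-3)/2))).sum := by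
        congr 1
        apply List.map_congr_left
        intro j hj
        have hj' := List.mem_range.mp hj
        apply pvG_stable
        have : 3 + 2 * j ≤ d - 1 := by omega
        have := pvPowLe (3 + 2 * j) (d - 1) this
        omega
      have hlast : pvG (n+1) (3 + 2 * ((d-3)/2)) = pvG n (3 + 2 * ((d-3)/2)) + 1 := by
        rw [hk]
        unfold pvG
        rw [min_eq_left (by omega), min_eq_left (by omega)]
        ring
      simp only [List.map_cons, List.map_nil, List.sum_cons, List.sum_nil, hfront, hlast, hodd]
      simp
      ring
    · -- d even: nothing changes
      rw [pvBsum_stable n ((d-1)/2) ?_]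
      · simp only [Nat.mod_two_ne_one.mp hodd, ← hddef]
        simp
      · intro j hj
        have : 3 + 2 * j ≤ d - 1 := by omega
        have := pvPowLe (3 + 2 * j) (d - 1) this
        omega
  · -- n + 1 = 10 ^ d
    have heq : n + 1 = 10 ^ d := by omega
    have hd' : pvD (n + 1) = d + 1 := by
      apply pvD_of_bracket (n + 1) (d + 1) (by omega)
      · simpa using le_of_eq heq.symm
      · have := pvPowLe d (d + 1) (by omega); omega
    rw [hd']
    by_cases hodd : d % 2 = 1
    · -- d odd, d+1 even: same range, all terms stable
      have hc : (d + 1 - 1) / 2 = (d - 1) / 2 := by omega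
      rw [hc, pvBsum_stable n ((d-1)/2) ?_]
      · simp only [Nat.succ_mod_two_eq_zero_iff.mpr hodd, ← hddef]
        simp
      · intro j hj
        have : 3 + 2 * j ≤ d := by omega
        have := pvPowLe (3 + 2 * j) d this
        omega
    · -- d even, d+1 odd: one new block of size 1
      have hc : (d + 1 - 1) / 2 = (d - 1) / 2 + 1 := by omega
      have hk : 3 + 2 * ((d - 1) / 2) = d + 1 := by omega
      rw [hc]
      unfold pvBsum
      rw [List.range_succ, List.map_append, List.sum_append]
      have hfront : (List.map (fun j => pvG (n+1) (3 + 2 * j)) (List.range ((d-1)/2))).sum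
          = (List.map (fun j => pvG n (3 + 2 * j)) (List.range ((d-1)/2))).sum := by
        congr 1
        apply List.map_congr_left
        intro j hj
        have hj' := List.mem_range.mp hj
        apply pvG_stable
        have : 3 + 2 * j ≤ d - 1 := by omega
        have := pvPowLe (3 + 2 * j) (d - 1) this
        omega
      have hlast : pvG (n+1) (3 + 2 * ((d-1)/2)) = 1 := by
        rw [hk]
        unfold pvG
        have hle : (10:Int) ^ d ≤ 10 ^ (d + 1) - 1 := by
          have := pvPowLe d (d + 1) (by omega); omega
        rw [min_eq_left (by omega)]
        simp
        omega
      simp only [List.map_cons, List.map_nil, List.sum_cons, List.sum_nil, hfront, hlast]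
      have : (d + 1) % 2 = 1 := by omega
      simp [this]
      ring

lemma pvA_step (n : Int) (h : 10 ≤ n) :
    count_odd_digits (n + 1) =
      count_odd_digits n + (if (pvD (n + 1)) % 2 == 1 then 1 else 0) := by
  rw [count_odd_digits, count_odd_digits, if_neg (by omega), if_neg (by omega)]
  rw [PySem.List.pyRange_one_succ_right (show (10:Int) ≤ n + 1 by omega)]
  rw [List.foldl_append]
  show (if (PySem.Int.toChars (n+1)).length % 2 == 1 then _ + 1 else _) = _
  simp only [pvD, beq_iff_eq]
  split_ifs with h1 <;> omega

lemma pvBase : count_odd_digits 10 = 9 ∧ count_odd_digits_alt 10 = 9 := by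
  constructor <;> decide

lemma pvMain : ∀ (m : Nat), count_odd_digits (10 + (m : Int)) = count_odd_digits_alt (10 + (m : Int)) := by
  intro m
  induction m with
  | zero => simpa using pvBase.1.trans pvBase.2.symm
  | succ m ih =>
    have he : (10:Int) + ((m + 1 : Nat) : Int) = (10 + (m:Int)) + 1 := by push_cast; ring
    rw [he, pvA_step _ (by omega), pvB_step _ (by omega), ih]

-- ===== VERDICT (by name: the statement is the Claim_ definition above) =====
theorem count_odd_digits_spec : Claim_equal_count_odd_digits := by
  intro n _
  unfold Spec_count_odd_digits
  by_cases h : n < 10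
  · simp [count_odd_digits, count_odd_digits_alt, h]
  · rw [not_lt] at h
    have hm : n = 10 + ((n - 10).toNat : Int) := by omega
    rw [hm]
    exact pvMain (n - 10).toNat
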